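-- pv_equiv track=rewrite | github.com/Ollson2921/cperms_ins_enc | cperms_ins_enc/check_regular/check_regular_vert.py | inc_con
-- ===== SOURCE A (Python) =====
-- def inc_con(cperm: list[int]) -> bool:
--     """Returns True if the sequence is increasing on bottom
--     and constant on top."""
--     max_val = max(cperm)
--     initial_val = max_val
--     for val in cperm[-1::-1]:
--         if val != max_val:
--             if val >= initial_val:
--                 return False
--             initial_val = val
--     return True
-- ===== SOURCE B (Python) =====
-- def inc_con(cperm: list[int]) -> bool:
--     """Returns True if the sequence is increasing on bottom
--     and constant on top."""
--     m = max(cperm)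
--     rest = [v for v in cperm if v != m]
--     n = len(rest)
--     return all(rest[i] < rest[j] for i in range(n) for j in range(i + 1, n))
-- ===== Notes on version B (the rewrite author's own statement) =====
-- stated objective: alternative
-- what changed: Replaces A's single backward scan that threads a moving threshold (initial_val) with an exhaustive all-pairs index check: every non-maximal element must be smaller than every later non-maximal element, with no running state at all.
import Mathlib
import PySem

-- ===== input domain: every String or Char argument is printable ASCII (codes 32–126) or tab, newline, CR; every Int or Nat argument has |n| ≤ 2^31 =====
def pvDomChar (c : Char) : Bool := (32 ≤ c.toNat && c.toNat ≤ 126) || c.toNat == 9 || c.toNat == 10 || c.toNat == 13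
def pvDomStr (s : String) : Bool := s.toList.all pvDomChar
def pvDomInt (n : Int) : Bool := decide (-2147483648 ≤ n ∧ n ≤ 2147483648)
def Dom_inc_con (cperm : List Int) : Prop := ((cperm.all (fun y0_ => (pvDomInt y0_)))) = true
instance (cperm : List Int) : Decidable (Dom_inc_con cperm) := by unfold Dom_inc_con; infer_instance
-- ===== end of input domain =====

-- B replaces A's stateful backward scan (moving threshold initial_val) by a stateless
-- all-pairs index check over the non-maximal elements (objective: alternative).

-- ===== PORT A =====
-- the for-loop of A: state = initial_val; early return False becomes the false branch
def incConLoop (maxVal : Int) (initialVal : Int) : List Int → Bool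
  | [] => true
  | v :: vs =>
    if v ≠ maxVal then
      if v ≥ initialVal then false
      else incConLoop maxVal v vs
    else incConLoop maxVal initialVal vs

def inc_con (cperm : List Int) : Bool :=
  match PySem.List.max? cperm (fun x => x) with
  | none => false          -- max([]) raises ValueError; excluded by Pre_inc_con
  | some maxVal =>
    match PySem.List.slice? cperm (some (-1)) none (-1) with   -- cperm[-1::-1]
    | none => false        -- unreachable: step = -1 ≠ 0
    | some rev => incConLoop maxVal maxVal rev

-- ===== PORT B =====
def inc_con_alt (cperm : List Int) : Bool :=
  match PySem.List.max? cperm (fun x => x) with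
  | none => false          -- max([]) raises ValueError; excluded by Pre_inc_con
  | some m =>
    let rest := cperm.filter (fun v => v ≠ m)
    let n : Int := PySem.List.len rest
    -- all(rest[i] < rest[j] for i in range(n) for j in range(i+1, n));
    -- the indices drawn from the ranges are always in bounds, so pyGetD is exact here
    (PySem.List.pyRange 0 n 1).all (fun i =>
      (PySem.List.pyRange (i + 1) n 1).all (fun j =>
        PySem.List.pyGetD rest i 0 < PySem.List.pyGetD rest j 0))

-- ===== PRECONDITION & SPEC =====
-- Pre_ excludes only the empty list, on which Python's max raises ValueError in both A and B.
def Pre_inc_con (cperm : List Int) : Prop := cperm ≠ []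
instance (cperm : List Int) : Decidable (Pre_inc_con cperm) := by unfold Pre_inc_con; infer_instance
def pvWitness_inc_con : List Int := ([1, 2, 3, 3])

def Spec_inc_con (cperm : List Int) (out : Bool) : Prop := out = inc_con_alt cperm
instance (cperm : List Int) (out : Bool) : Decidable (Spec_inc_con cperm out) := by unfold Spec_inc_con; infer_instance

-- ===== CLAIM (what is proved, stated in full; the proofs are below) =====
def Claim_equal_inc_con : Prop := ∀ (cperm : List Int), Dom_inc_con cperm → Pre_inc_con cperm → Spec_inc_con cperm (inc_con cperm)

-- ===== LEMMAS AND PROOFS =====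

-- cperm[-1::-1] is reverse (also on [], but nil is handled by decide)
theorem pvSliceIdx (n : Nat) :
    PySem.List.sliceIndices (n+1) (some (-1)) none (-1) = PySem.List.sliceIndices (n+1) none none (-1) := by
  simp [PySem.List.sliceIndices]

theorem pvSliceRev (xs : List Int) :
    PySem.List.slice? xs (some (-1)) none (-1) = some xs.reverse := by
  cases xs with
  | nil => decide
  | cons a t =>
    have h := PySem.List.slice?_none_none_neg_one (xs := a :: t)
    simp only [PySem.List.slice?] at h ⊢
    rw [show (a :: t).length = t.length + 1 from rfl, pvSliceIdx] at *
    exact h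

-- A's loop equals a strictly-decreasing chain test on the filtered list
theorem pvLoopChain (m init : Int) (xs : List Int) :
    incConLoop m init xs = true ↔ List.IsChain (fun a b => b < a) (init :: xs.filter (fun v => decide (v ≠ m))) := by
  induction xs generalizing init with
  | nil => simp [incConLoop, List.isChain_cons]
  | cons v vs ih =>
    by_cases hv : v = m
    · simp [incConLoop, hv, ih]
    · simp only [incConLoop, if_pos hv]
      rw [List.filter_cons_of_pos (by simpa using hv)]
      by_cases hge : v ≥ init
      · simp only [if_pos hge, List.isChain_cons_cons]
        constructor
        · intro h; simp at h
        · rintro ⟨h1, -⟩; omega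
      · simp only [if_neg hge, ih, List.isChain_cons_cons]
        constructor
        · intro h; exact ⟨by omega, h⟩
        · rintro ⟨-, h⟩; exact h

-- B's all-pairs index test equals Pairwise (<) on the filtered list
theorem pvAllPairs (r : List Int) :
    ((PySem.List.pyRange 0 (PySem.List.len r) 1).all (fun i =>
      (PySem.List.pyRange (i + 1) (PySem.List.len r) 1).all (fun j =>
        PySem.List.pyGetD r i 0 < PySem.List.pyGetD r j 0)) = true) ↔ List.Pairwise (· < ·) r := by
  rw [List.pairwise_iff_getElem]
  simp only [List.all_eq_true, PySem.List.mem_pyRange_one, decide_eq_true_eq, PySem.List.len_eq]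
  constructor
  · intro h i j hi hj hij
    have := h (i : Int) ⟨by omega, by exact_mod_cast hi⟩ (j : Int) ⟨by exact_mod_cast hij, by exact_mod_cast hj⟩
    simp only [PySem.List.pyGetD_natCast] at this
    rwa [List.getD_eq_getElem r 0 hi, List.getD_eq_getElem r 0 hj] at this
  · intro h i hi j hj
    rw [PySem.List.pyGetD_eq_getElem r 0 hi.1 (by simpa using hi.2),
        PySem.List.pyGetD_eq_getElem r 0 (by omega) (by simpa using hj.2)]
    exact h i.toNat j.toNat (by omega) (by omega) (by omega)

theorem inc_con_spec : Claim_equal_inc_con := by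
  intro cperm _ hpre
  unfold Spec_inc_con inc_con inc_con_alt
  match hmax : PySem.List.max? cperm (fun x => x) with
  | none =>
    cases cperm with
    | nil => exact absurd rfl hpre
    | cons a t => rw [PySem.List.max?_id_cons] at hmax
  | some m =>
    rw [pvSliceRev]
    have hmaxel : ∀ y ∈ cperm, y ≤ m := by
      intro y hy
      exact PySem.List.max?_isMax hmax y hy
    set rest := cperm.filter (fun v => decide (v ≠ m)) with hrest
    have hlt : ∀ x ∈ rest, x < m := by
      intro x hx
      rw [hrest, List.mem_filter] at hx
      have := hmaxel x hx.1
      have hne : x ≠ m := by simpa using hx.2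
      omega
    have hA : incConLoop m m cperm.reverse = true ↔ List.IsChain (fun a b => b < a) (m :: rest.reverse) := by
      rw [pvLoopChain, List.filter_reverse]
    have hB := pvAllPairs rest
    have hchain : List.IsChain (fun a b => b < a) (m :: rest.reverse) ↔ List.Pairwise (· < ·) rest := by
      rw [List.isChain_cons, List.isChain_reverse]
      constructor
      · intro h
        exact List.isChain_iff_pairwise.mp h.2
      · intro h
        refine ⟨?_, List.isChain_iff_pairwise.mpr h⟩
        intro y hy
        exact hlt y (List.mem_reverse.mp (List.mem_of_mem_head? hy))
    have hiff := (hA.trans hchain).trans hB.symm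
    have goalEq : incConLoop m m cperm.reverse =
        ((PySem.List.pyRange 0 (PySem.List.len rest) 1).all (fun i =>
          (PySem.List.pyRange (i + 1) (PySem.List.len rest) 1).all (fun j =>
            PySem.List.pyGetD rest i 0 < PySem.List.pyGetD rest j 0))) := by
      cases hA' : incConLoop m m cperm.reverse <;>
        cases hB' : (PySem.List.pyRange 0 (PySem.List.len rest) 1).all (fun i =>
          (PySem.List.pyRange (i + 1) (PySem.List.len rest) 1).all (fun j =>
            PySem.List.pyGetD rest i 0 < PySem.List.pyGetD rest j 0))
      · rfl
      · rw [hiff.mpr hB'] at hA'; exact absurd hA' (by decide)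
      · rw [hiff.mp hA'] at hB'; exact absurd hB' (by decide)
      · rfl
    exact goalEq
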